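-- pv_equiv track=rewrite | github.com/hajjejimohamed900/ai-foreinsic | server/backend.py | analyze_session_intent
-- ===== SOURCE A (Python) =====
-- def analyze_session_intent(logs):
--     scores = {"S1": 0, "S2": 0, "S3": 0, "S4": 0, "S5": 0}
--
--     for l in logs:
--         msg = l.get('message', '').lower()
--         svc = str(l.get('service', '')).lower()
--
--         # S1: SSH Brute Force Profiling
--         if 'ssh' in svc or 'ssh' in msg: scores["S1"] += 2
--         if 'failed password' in msg or 'accepted password' in msg: scores["S1"] += 5
--         if 'preauth' in msg or 'authentication' in msg: scores["S1"] += 2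
--
--         # S3: DDoS SYN Flood Profiling
--         if 'syn flood' in msg: scores["S3"] += 10
--         if svc in ['kernel', 'iptables'] and 'tcp' in msg: scores["S3"] += 3
--         if 'dropped' in msg and 'packets' in msg: scores["S3"] += 4
--         if 'connection limit' in msg or 'exhausting memory' in msg: scores["S3"] += 5
--
--         # S4: Web SQLi / Injection Profiling
--         if svc == 'nginx' or 'get ' in msg or 'http' in msg: scores["S4"] += 2
--         if 'union' in msg or 'select' in msg or '1=1' in msg: scores["S4"] += 8
--         if 'script>' in msg or 'iframe' in msg or '.php' in msg: scores["S4"] += 6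
--
--         # S2: DNS Profiling
--         if 'dns' in svc or 'txt query' in msg: scores["S2"] += 6
--
--         # S5: SMB Profiling
--         if 'smb' in svc or 'rpc' in msg: scores["S5"] += 6
--
--     # Return the scenario with the highest confidence score
--     best_match = max(scores, key=scores.get)
--     return best_match if scores[best_match] > 0 else "DEFAULT"
-- ===== SOURCE B (Python) =====
-- def analyze_session_intent(logs):
--     # Staged passes: normalize once, then compute each scenario's total as an
--     # independent sum over the logs, then an explicit first-argmax scan.
--     pairs = [(l.get('message', '').lower(), str(l.get('service', '')).lower())
--              for l in logs]
--
--     def s1(m, s):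
--         return ((2 if 'ssh' in s or 'ssh' in m else 0)
--                 + (5 if 'failed password' in m or 'accepted password' in m else 0)
--                 + (2 if 'preauth' in m or 'authentication' in m else 0))
--
--     def s2(m, s):
--         return 6 if 'dns' in s or 'txt query' in m else 0
--
--     def s3(m, s):
--         return ((10 if 'syn flood' in m else 0)
--                 + (3 if s in ('kernel', 'iptables') and 'tcp' in m else 0)
--                 + (4 if 'dropped' in m and 'packets' in m else 0)
--                 + (5 if 'connection limit' in m or 'exhausting memory' in m else 0))
--
--     def s4(m, s):
--         return ((2 if s == 'nginx' or 'get ' in m or 'http' in m else 0)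
--                 + (8 if 'union' in m or 'select' in m or '1=1' in m else 0)
--                 + (6 if 'script>' in m or 'iframe' in m or '.php' in m else 0))
--
--     def s5(m, s):
--         return 6 if 'smb' in s or 'rpc' in m else 0
--
--     totals = [("S1", sum(s1(m, s) for m, s in pairs)),
--               ("S2", sum(s2(m, s) for m, s in pairs)),
--               ("S3", sum(s3(m, s) for m, s in pairs)),
--               ("S4", sum(s4(m, s) for m, s in pairs)),
--               ("S5", sum(s5(m, s) for m, s in pairs))]
--
--     best_key, best_score = totals[0]
--     for k, v in totals[1:]:
--         if v > best_score:
--             best_key, best_score = k, v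
--     return best_key if best_score > 0 else "DEFAULT"
-- ===== Notes on version B (the rewrite author's own statement) =====
-- stated objective: alternative
-- what changed: Replaced A's single pass that mutates a shared scores dict with staged passes: normalize all logs once, compute each scenario's total as an independent sum over the logs, and pick the winner with an explicit first-argmax scan instead of max(dict, key=...).
import Mathlib
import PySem

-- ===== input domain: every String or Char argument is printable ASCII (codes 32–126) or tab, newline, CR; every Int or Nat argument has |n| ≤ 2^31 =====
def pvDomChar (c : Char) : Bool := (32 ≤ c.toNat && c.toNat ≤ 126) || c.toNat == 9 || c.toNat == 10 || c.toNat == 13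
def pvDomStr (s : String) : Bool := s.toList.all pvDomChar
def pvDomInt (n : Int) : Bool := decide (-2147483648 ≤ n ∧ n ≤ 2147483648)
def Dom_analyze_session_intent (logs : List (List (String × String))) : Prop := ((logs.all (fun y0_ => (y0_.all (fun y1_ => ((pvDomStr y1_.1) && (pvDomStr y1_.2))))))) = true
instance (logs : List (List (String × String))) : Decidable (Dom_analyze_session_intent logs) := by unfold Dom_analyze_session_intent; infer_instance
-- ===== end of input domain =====

-- B replaces A's single pass mutating a shared scores dict by staged passes (normalize once,
-- one independent sum per scenario) and an explicit first-argmax scan (objective: alternative; same cost).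

-- ===== PORT A =====
-- loop body of A: the 12 inline conditionals updating the scores dict
def pvStepA (d : PySem.Dict String Int) (l : List (String × String)) : PySem.Dict String Int :=
  let msg := PySem.Str.lower ((PySem.Dict.ofList l).getD "message" "")
  let svc := PySem.Str.lower ((PySem.Dict.ofList l).getD "service" "")
  let d := if PySem.Str.isIn "ssh" svc || PySem.Str.isIn "ssh" msg then d.modify "S1" 0 (· + 2) else d
  let d := if PySem.Str.isIn "failed password" msg || PySem.Str.isIn "accepted password" msg then d.modify "S1" 0 (· + 5) else d
  let d := if PySem.Str.isIn "preauth" msg || PySem.Str.isIn "authentication" msg then d.modify "S1" 0 (· + 2) else d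
  let d := if PySem.Str.isIn "syn flood" msg then d.modify "S3" 0 (· + 10) else d
  let d := if (svc == "kernel" || svc == "iptables") && PySem.Str.isIn "tcp" msg then d.modify "S3" 0 (· + 3) else d
  let d := if PySem.Str.isIn "dropped" msg && PySem.Str.isIn "packets" msg then d.modify "S3" 0 (· + 4) else d
  let d := if PySem.Str.isIn "connection limit" msg || PySem.Str.isIn "exhausting memory" msg then d.modify "S3" 0 (· + 5) else d
  let d := if svc == "nginx" || PySem.Str.isIn "get " msg || PySem.Str.isIn "http" msg then d.modify "S4" 0 (· + 2) else d
  let d := if PySem.Str.isIn "union" msg || PySem.Str.isIn "select" msg || PySem.Str.isIn "1=1" msg then d.modify "S4" 0 (· + 8) else d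
  let d := if PySem.Str.isIn "script>" msg || PySem.Str.isIn "iframe" msg || PySem.Str.isIn ".php" msg then d.modify "S4" 0 (· + 6) else d
  let d := if PySem.Str.isIn "dns" svc || PySem.Str.isIn "txt query" msg then d.modify "S2" 0 (· + 6) else d
  let d := if PySem.Str.isIn "smb" svc || PySem.Str.isIn "rpc" msg then d.modify "S5" 0 (· + 6) else d
  d

def analyze_session_intent (logs : List (List (String × String))) : String :=
  let scores := logs.foldl pvStepA
    (PySem.Dict.ofList [("S1", 0), ("S2", 0), ("S3", 0), ("S4", 0), ("S5", 0)])
  match PySem.List.max? scores.keys (fun k => scores.getD k 0) with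
  | some best_match => if scores.getD best_match 0 > 0 then best_match else "DEFAULT"
  | none => "DEFAULT"

-- ===== PORT B =====
-- B: normalize one log to its (message, service) lower-cased pair
def pvPrep (l : List (String × String)) : String × String :=
  (PySem.Str.lower ((PySem.Dict.ofList l).getD "message" ""),
   PySem.Str.lower ((PySem.Dict.ofList l).getD "service" ""))

-- B: per-log points of each scenario
def pvS1 (m s : String) : Int :=
  (if PySem.Str.isIn "ssh" s || PySem.Str.isIn "ssh" m then 2 else 0)
  + (if PySem.Str.isIn "failed password" m || PySem.Str.isIn "accepted password" m then 5 else 0)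
  + (if PySem.Str.isIn "preauth" m || PySem.Str.isIn "authentication" m then 2 else 0)

def pvS2 (m s : String) : Int :=
  if PySem.Str.isIn "dns" s || PySem.Str.isIn "txt query" m then 6 else 0

def pvS3 (m s : String) : Int :=
  (if PySem.Str.isIn "syn flood" m then 10 else 0)
  + (if (s == "kernel" || s == "iptables") && PySem.Str.isIn "tcp" m then 3 else 0)
  + (if PySem.Str.isIn "dropped" m && PySem.Str.isIn "packets" m then 4 else 0)
  + (if PySem.Str.isIn "connection limit" m || PySem.Str.isIn "exhausting memory" m then 5 else 0)

def pvS4 (m s : String) : Int :=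
  (if s == "nginx" || PySem.Str.isIn "get " m || PySem.Str.isIn "http" m then 2 else 0)
  + (if PySem.Str.isIn "union" m || PySem.Str.isIn "select" m || PySem.Str.isIn "1=1" m then 8 else 0)
  + (if PySem.Str.isIn "script>" m || PySem.Str.isIn "iframe" m || PySem.Str.isIn ".php" m then 6 else 0)

def pvS5 (m s : String) : Int :=
  if PySem.Str.isIn "smb" s || PySem.Str.isIn "rpc" m then 6 else 0

def analyze_session_intent_alt (logs : List (List (String × String))) : String :=
  let pairs := logs.map pvPrep
  let totals : List (String × Int) :=
    [ ("S1", (pairs.map (fun p => pvS1 p.1 p.2)).sum),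
      ("S2", (pairs.map (fun p => pvS2 p.1 p.2)).sum),
      ("S3", (pairs.map (fun p => pvS3 p.1 p.2)).sum),
      ("S4", (pairs.map (fun p => pvS4 p.1 p.2)).sum),
      ("S5", (pairs.map (fun p => pvS5 p.1 p.2)).sum) ]
  match totals with
  | [] => "DEFAULT"
  | t0 :: rest =>
    let best := rest.foldl (fun b kv => if kv.2 > b.2 then kv else b) t0
    if best.2 > 0 then best.1 else "DEFAULT"

-- ===== PRECONDITION & SPEC =====
def Spec_analyze_session_intent (logs : List (List (String × String))) (out : String) : Prop := out = analyze_session_intent_alt logs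
instance (logs : List (List (String × String))) (out : String) : Decidable (Spec_analyze_session_intent logs out) := by unfold Spec_analyze_session_intent; infer_instance

-- ===== CLAIM (what is proved, stated in full; the proofs are below) =====
def Claim_equal_analyze_session_intent : Prop := ∀ (logs : List (List (String × String))), Dom_analyze_session_intent logs → Spec_analyze_session_intent logs (analyze_session_intent logs)

-- ===== LEMMAS AND PROOFS =====

-- the shape of A's scores dict: five fixed keys, symbolic values
def pvMk (a b c d e : Int) : PySem.Dict String Int :=
  PySem.Dict.ofList [("S1", a), ("S2", b), ("S3", c), ("S4", d), ("S5", e)]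

theorem pvMod1 (c : Prop) [Decidable c] (p a b c3 d e : Int) :
    (if c then (pvMk a b c3 d e).modify "S1" 0 (· + p) else pvMk a b c3 d e)
    = pvMk (a + if c then p else 0) b c3 d e := by
  split_ifs with h
  · rfl
  · simp

theorem pvMod2 (c : Prop) [Decidable c] (p a b c3 d e : Int) :
    (if c then (pvMk a b c3 d e).modify "S2" 0 (· + p) else pvMk a b c3 d e)
    = pvMk a (b + if c then p else 0) c3 d e := by
  split_ifs with h
  · rfl
  · simp

theorem pvMod3 (c : Prop) [Decidable c] (p a b c3 d e : Int) :
    (if c then (pvMk a b c3 d e).modify "S3" 0 (· + p) else pvMk a b c3 d e)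
    = pvMk a b (c3 + if c then p else 0) d e := by
  split_ifs with h
  · rfl
  · simp

theorem pvMod4 (c : Prop) [Decidable c] (p a b c3 d e : Int) :
    (if c then (pvMk a b c3 d e).modify "S4" 0 (· + p) else pvMk a b c3 d e)
    = pvMk a b c3 (d + if c then p else 0) e := by
  split_ifs with h
  · rfl
  · simp

theorem pvMod5 (c : Prop) [Decidable c] (p a b c3 d e : Int) :
    (if c then (pvMk a b c3 d e).modify "S5" 0 (· + p) else pvMk a b c3 d e)
    = pvMk a b c3 d (e + if c then p else 0) := by
  split_ifs with h
  · rfl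
  · simp

theorem pvStepA_mk (a b c d e : Int) (l : List (String × String)) :
    pvStepA (pvMk a b c d e) l =
      pvMk (a + pvS1 (pvPrep l).1 (pvPrep l).2) (b + pvS2 (pvPrep l).1 (pvPrep l).2)
           (c + pvS3 (pvPrep l).1 (pvPrep l).2) (d + pvS4 (pvPrep l).1 (pvPrep l).2)
           (e + pvS5 (pvPrep l).1 (pvPrep l).2) := by
  simp only [pvStepA, pvMod1, pvMod2, pvMod3, pvMod4, pvMod5, pvPrep, pvS1, pvS2, pvS3, pvS4, pvS5]
  congr 1 <;> ring_nf

theorem pvFoldA (logs : List (List (String × String))) (a b c d e : Int) :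
    logs.foldl pvStepA (pvMk a b c d e) =
      pvMk (a + ((logs.map pvPrep).map (fun p => pvS1 p.1 p.2)).sum)
           (b + ((logs.map pvPrep).map (fun p => pvS2 p.1 p.2)).sum)
           (c + ((logs.map pvPrep).map (fun p => pvS3 p.1 p.2)).sum)
           (d + ((logs.map pvPrep).map (fun p => pvS4 p.1 p.2)).sum)
           (e + ((logs.map pvPrep).map (fun p => pvS5 p.1 p.2)).sum) := by
  induction logs generalizing a b c d e with
  | nil => simp
  | cons h t ih =>
    simp only [List.foldl_cons, List.map_cons, List.sum_cons, pvStepA_mk, ih]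
    congr 1 <;> ring_nf

-- A's tail (first-max over the dict keys) equals B's explicit scan, for any five values
set_option maxHeartbeats 2000000 in
theorem pvTailEq (v1 v2 v3 v4 v5 : Int) :
    (match PySem.List.max? (pvMk v1 v2 v3 v4 v5).keys (fun k => (pvMk v1 v2 v3 v4 v5).getD k 0) with
     | some bm => if (pvMk v1 v2 v3 v4 v5).getD bm 0 > 0 then bm else "DEFAULT"
     | none => "DEFAULT")
    = (let best := [("S2", v2), ("S3", v3), ("S4", v4), ("S5", v5)].foldl
         (fun b kv => if kv.2 > b.2 then kv else b) (("S1", v1) : String × Int);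
       if best.2 > 0 then best.1 else "DEFAULT") := by
  simp only [pvMk, PySem.List.max?, PySem.Dict.keys, PySem.Dict.getD, PySem.Dict.get?,
    PySem.Dict.ofList, PySem.Dict.update, PySem.Dict.insert, PySem.Dict.empty,
    List.foldl, List.map]
  by_cases h2 : v1 < v2 <;> simp [h2] <;>
  (repeat' (first | rfl | omega | (split_ifs <;> simp_all)))

-- ===== VERDICT (by name: the statement is the Claim_ definition above) =====
theorem analyze_session_intent_spec : Claim_equal_analyze_session_intent := by
  intro logs _
  unfold Spec_analyze_session_intent analyze_session_intent analyze_session_intent_alt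
  have h0 : (PySem.Dict.ofList [("S1", (0:Int)), ("S2", 0), ("S3", 0), ("S4", 0), ("S5", 0)]) = pvMk 0 0 0 0 0 := rfl
  rw [h0, pvFoldA]
  simp only [zero_add]
  exact pvTailEq _ _ _ _ _
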